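-- pv_equiv track=rewrite | github.com/xamtheone/adventofcode2025 | 09/9.2.py | are_corners_in_four_walls
-- ===== SOURCE A (Python) =====
-- def are_corners_in_four_walls(minx, miny, maxx, maxy, horizontals, verticals):
--     valid_corners = 0
--     for px, py in ((minx, miny), (minx, maxy), (maxx, miny), (maxx, maxy)):
--         hitup = False
--         hitdown = False
--         hitleft = False
--         hitright = False
--
--         for (sx, sy), (ex, ey) in horizontals:
--             inside = min(sx, ex) <= px <= max(sx, ex)
--             if not hitup and sy <= py and inside:
--                 hitup = True
--                 if hitdown: break
--             if not hitdown and sy >= py and inside: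
--                 hitdown = True
--                 if hitup: break
--
--         if hitup and hitdown:
--             for (sx, sy), (ex, ey) in verticals:
--                 inside = min(sy, ey) <= py <= max(sy, ey)
--                 if not hitleft and sx <= px and inside:
--                     hitleft = True
--                     if hitright: break
--                 if not hitright and sx >= px and inside:
--                     hitright = True
--                     if hitleft: break
--
--         if hitup and hitleft and hitdown and hitright:
--             valid_corners += 1
--
--     return valid_corners == 4
-- ===== SOURCE B (Python) =====
-- def _h_extrema(px, horizontals):
--     # min and max sy among horizontal walls whose x-span covers px (None if no wall covers px)
--     lo = hi = None
--     for (sx, sy), (ex, ey) in horizontals: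
--         if min(sx, ex) <= px <= max(sx, ex):
--             lo = sy if lo is None else min(lo, sy)
--             hi = sy if hi is None else max(hi, sy)
--     return lo, hi
--
--
-- def _v_extrema(py, verticals):
--     # min and max sx among vertical walls whose y-span covers py (None if no wall covers py)
--     lo = hi = None
--     for (sx, sy), (ex, ey) in verticals:
--         if min(sy, ey) <= py <= max(sy, ey):
--             lo = sx if lo is None else min(lo, sx)
--             hi = sx if hi is None else max(hi, sx)
--     return lo, hi
--
--
-- def are_corners_in_four_walls(minx, miny, maxx, maxy, horizontals, verticals):
--     hmin = _h_extrema(minx, horizontals)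
--     hmax = _h_extrema(maxx, horizontals)
--     vmin = _v_extrema(miny, verticals)
--     vmax = _v_extrema(maxy, verticals)
--     for px, py, (hlo, hhi), (vlo, vhi) in ((minx, miny, hmin, vmin),
--                                            (minx, maxy, hmin, vmax),
--                                            (maxx, miny, hmax, vmin),
--                                            (maxx, maxy, hmax, vmax)):
--         if hlo is None or not (hlo <= py <= hhi):
--             return False
--         if vlo is None or not (vlo <= px <= vhi):
--             return False
--     return True
-- ===== Notes on version B (the rewrite author's own statement) =====
-- stated objective: alternative
-- what changed: Instead of A's per-corner stateful existence scans with early breaks, B precomputes in one pass per wall list the min/max wall coordinate among walls covering each bbox x (resp. y) value, then decides every corner by O(1) interval comparisons on those extrema.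
import Mathlib
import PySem

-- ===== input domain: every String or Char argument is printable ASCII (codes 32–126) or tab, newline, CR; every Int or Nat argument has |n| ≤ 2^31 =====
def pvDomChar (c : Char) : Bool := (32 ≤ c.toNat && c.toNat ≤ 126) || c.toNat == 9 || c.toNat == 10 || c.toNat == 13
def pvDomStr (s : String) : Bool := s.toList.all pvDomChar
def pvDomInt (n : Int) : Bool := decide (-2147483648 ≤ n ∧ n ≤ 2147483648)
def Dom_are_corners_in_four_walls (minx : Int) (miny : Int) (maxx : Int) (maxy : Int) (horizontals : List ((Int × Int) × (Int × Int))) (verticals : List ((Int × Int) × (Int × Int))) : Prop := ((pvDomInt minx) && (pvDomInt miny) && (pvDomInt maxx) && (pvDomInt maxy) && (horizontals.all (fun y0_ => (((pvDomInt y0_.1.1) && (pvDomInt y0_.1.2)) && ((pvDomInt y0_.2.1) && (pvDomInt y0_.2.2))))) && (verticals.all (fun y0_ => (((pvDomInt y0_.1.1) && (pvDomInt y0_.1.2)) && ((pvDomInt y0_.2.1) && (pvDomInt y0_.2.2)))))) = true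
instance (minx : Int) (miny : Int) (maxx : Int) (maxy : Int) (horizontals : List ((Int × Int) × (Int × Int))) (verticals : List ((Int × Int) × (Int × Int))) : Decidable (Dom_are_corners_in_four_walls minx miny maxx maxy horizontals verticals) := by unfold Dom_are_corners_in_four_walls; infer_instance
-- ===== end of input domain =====

-- B replaces A's per-corner stateful existence scans by precomputed min/max extrema of covering walls, answering each corner in O(1); return values proved equal (objective: alternative).
-- ===== PORT A =====
-- inner loop over horizontals, with its two break sites, as structural recursion on the list
def pvHScan (px py : Int) (hu hd : Bool) : List ((Int × Int) × (Int × Int)) → Bool × Bool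
  | [] => (hu, hd)
  | ((sx, sy), (ex, _)) :: rest =>
    let inside := decide (min sx ex ≤ px ∧ px ≤ max sx ex)
    if !hu && decide (sy ≤ py) && inside then
      if hd then (true, hd)
      else
        if !hd && decide (sy ≥ py) && inside then (true, true)
        else pvHScan px py true hd rest
    else
      if !hd && decide (sy ≥ py) && inside then
        if hu then (hu, true) else pvHScan px py hu true rest
      else pvHScan px py hu hd rest

-- inner loop over verticals, same shape
def pvVScan (px py : Int) (hl hr : Bool) : List ((Int × Int) × (Int × Int)) → Bool × Bool
  | [] => (hl, hr)
  | ((sx, sy), (_, ey)) :: rest =>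
    let inside := decide (min sy ey ≤ py ∧ py ≤ max sy ey)
    if !hl && decide (sx ≤ px) && inside then
      if hr then (true, hr)
      else
        if !hr && decide (sx ≥ px) && inside then (true, true)
        else pvVScan px py true hr rest
    else
      if !hr && decide (sx ≥ px) && inside then
        if hl then (hl, true) else pvVScan px py hl true rest
      else pvVScan px py hl hr rest

def are_corners_in_four_walls (minx : Int) (miny : Int) (maxx : Int) (maxy : Int) (horizontals : List ((Int × Int) × (Int × Int))) (verticals : List ((Int × Int) × (Int × Int))) : Bool :=
  let valid_corners : Int :=
    [(minx, miny), (minx, maxy), (maxx, miny), (maxx, maxy)].foldl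
      (fun acc p =>
        let px := p.1
        let py := p.2
        let h := pvHScan px py false false horizontals
        let hitup := h.1
        let hitdown := h.2
        let v := if hitup && hitdown then pvVScan px py false false verticals else (false, false)
        let hitleft := v.1
        let hitright := v.2
        if hitup && hitleft && hitdown && hitright then acc + 1 else acc)
      0
  valid_corners == 4

-- ===== PORT B =====
-- _h_extrema: min/max sy among horizontal walls whose x-span covers px (none if no cover)
def pvHExt (px : Int) (horizontals : List ((Int × Int) × (Int × Int))) : Option Int × Option Int :=
  horizontals.foldl
    (fun acc q =>
      if decide (min q.1.1 q.2.1 ≤ px ∧ px ≤ max q.1.1 q.2.1) then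
        ((match acc.1 with | none => some q.1.2 | some l => some (min l q.1.2)),
         (match acc.2 with | none => some q.1.2 | some h => some (max h q.1.2)))
      else acc)
    (none, none)

-- _v_extrema: min/max sx among vertical walls whose y-span covers py (none if no cover)
def pvVExt (py : Int) (verticals : List ((Int × Int) × (Int × Int))) : Option Int × Option Int :=
  verticals.foldl
    (fun acc q =>
      if decide (min q.1.2 q.2.2 ≤ py ∧ py ≤ max q.1.2 q.2.2) then
        ((match acc.1 with | none => some q.1.1 | some l => some (min l q.1.1)),
         (match acc.2 with | none => some q.1.1 | some h => some (max h q.1.1)))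
      else acc)
    (none, none)

-- the body of B's per-corner check (the two early-return tests, as a conjunction)
def pvOkPair (p : Option Int × Option Int) (x : Int) : Bool :=
  match p with
  | (some lo, some hi) => decide (lo ≤ x ∧ x ≤ hi)
  | _ => false

def pvOkCorner (px py : Int) (h v : Option Int × Option Int) : Bool :=
  pvOkPair h py && pvOkPair v px

def are_corners_in_four_walls_alt (minx : Int) (miny : Int) (maxx : Int) (maxy : Int) (horizontals : List ((Int × Int) × (Int × Int))) (verticals : List ((Int × Int) × (Int × Int))) : Bool :=
  let hmin := pvHExt minx horizontals
  let hmax := pvHExt maxx horizontals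
  let vmin := pvVExt miny verticals
  let vmax := pvVExt maxy verticals
  [(minx, miny, hmin, vmin), (minx, maxy, hmin, vmax),
   (maxx, miny, hmax, vmin), (maxx, maxy, hmax, vmax)].all
    fun t => pvOkCorner t.1 t.2.1 t.2.2.1 t.2.2.2

-- ===== PRECONDITION & SPEC =====
def Spec_are_corners_in_four_walls (minx : Int) (miny : Int) (maxx : Int) (maxy : Int) (horizontals : List ((Int × Int) × (Int × Int))) (verticals : List ((Int × Int) × (Int × Int))) (out : Bool) : Prop := out = are_corners_in_four_walls_alt minx miny maxx maxy horizontals verticals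
instance (minx : Int) (miny : Int) (maxx : Int) (maxy : Int) (horizontals : List ((Int × Int) × (Int × Int))) (verticals : List ((Int × Int) × (Int × Int))) (out : Bool) : Decidable (Spec_are_corners_in_four_walls minx miny maxx maxy horizontals verticals out) := by unfold Spec_are_corners_in_four_walls; infer_instance

-- ===== CLAIM (what is proved, stated in full; the proofs are below) =====
def Claim_equal_are_corners_in_four_walls : Prop := ∀ (minx : Int) (miny : Int) (maxx : Int) (maxy : Int) (horizontals : List ((Int × Int) × (Int × Int))) (verticals : List ((Int × Int) × (Int × Int))), Dom_are_corners_in_four_walls minx miny maxx maxy horizontals verticals → Spec_are_corners_in_four_walls minx miny maxx maxy horizontals verticals (are_corners_in_four_walls minx miny maxx maxy horizontals verticals)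

-- ===== LEMMAS AND PROOFS =====
-- A's flag scans compute plain existence booleans
theorem pvHScan_eq (px py : Int) (hu hd : Bool) (L : List ((Int × Int) × (Int × Int))) :
    pvHScan px py hu hd L =
      (hu || L.any (fun q => decide (q.1.2 ≤ py) && decide (min q.1.1 q.2.1 ≤ px ∧ px ≤ max q.1.1 q.2.1)),
       hd || L.any (fun q => decide (q.1.2 ≥ py) && decide (min q.1.1 q.2.1 ≤ px ∧ px ≤ max q.1.1 q.2.1))) := by
  induction L generalizing hu hd with
  | nil => simp [pvHScan]
  | cons h t ih =>
    obtain ⟨⟨sx, sy⟩, ⟨ex, ey⟩⟩ := h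
    simp only [pvHScan, List.any_cons]
    cases h3 : decide (min sx ex ≤ px ∧ px ≤ max sx ex) <;>
      cases h1 : decide (sy ≤ py) <;> cases h2 : decide (sy ≥ py) <;>
      cases hu <;> cases hd <;>
      simp [h1, h2, h3, ih]

theorem pvVScan_eq (px py : Int) (hl hr : Bool) (L : List ((Int × Int) × (Int × Int))) :
    pvVScan px py hl hr L =
      (hl || L.any (fun q => decide (q.1.1 ≤ px) && decide (min q.1.2 q.2.2 ≤ py ∧ py ≤ max q.1.2 q.2.2)),
       hr || L.any (fun q => decide (q.1.1 ≥ px) && decide (min q.1.2 q.2.2 ≤ py ∧ py ≤ max q.1.2 q.2.2))) := by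
  induction L generalizing hl hr with
  | nil => simp [pvVScan]
  | cons h t ih =>
    obtain ⟨⟨sx, sy⟩, ⟨ex, ey⟩⟩ := h
    simp only [pvVScan, List.any_cons]
    cases h3 : decide (min sy ey ≤ py ∧ py ≤ max sy ey) <;>
      cases h1 : decide (sx ≤ px) <;> cases h2 : decide (sx ≥ px) <;>
      cases hl <;> cases hr <;>
      simp [h1, h2, h3, ih]

def pvOLe (o : Option Int) (y : Int) : Bool := match o with | none => false | some l => decide (l ≤ y)
def pvOGe (o : Option Int) (y : Int) : Bool := match o with | none => false | some h => decide (y ≤ h)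

theorem pvMatch_eq (a b : Option Int) (x : Int) (hs : a = none ↔ b = none) :
    pvOkPair (a, b) x = (pvOLe a x && pvOGe b x) := by
  cases a with
  | none =>
    have hb : b = none := hs.mp rfl
    subst hb; simp [pvOkPair, pvOLe, pvOGe]
  | some lo =>
    cases b with
    | none => exact absurd (hs.mpr rfl) (by simp)
    | some hi =>
      by_cases h1 : lo ≤ x <;> by_cases h2 : x ≤ hi <;> simp [pvOkPair, pvOLe, pvOGe, h1, h2]

-- a fold over a pair accumulator splits into two independent folds
theorem pvFold_split (L : List ((Int × Int) × (Int × Int)))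
    (c : ((Int × Int) × (Int × Int)) → Bool) (f g : Option Int → ((Int × Int) × (Int × Int)) → Option Int)
    (lo hi : Option Int) :
    L.foldl (fun acc q => if c q then (f acc.1 q, g acc.2 q) else acc) (lo, hi)
      = (L.foldl (fun a q => if c q then f a q else a) lo,
         L.foldl (fun a q => if c q then g a q else a) hi) := by
  induction L generalizing lo hi with
  | nil => rfl
  | cons q t ih =>
    simp only [List.foldl_cons]
    cases hc : c q <;> simp [hc, ih]

-- running-min fold: "result ≤ y" = "acc ≤ y or some selected element's value ≤ y"
theorem pvFoldMin_le (L : List ((Int × Int) × (Int × Int)))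
    (c : ((Int × Int) × (Int × Int)) → Bool) (v : ((Int × Int) × (Int × Int)) → Int) (y : Int)
    (lo : Option Int) :
    pvOLe (L.foldl (fun a q => if c q then (match a with | none => some (v q) | some l => some (min l (v q))) else a) lo) y
      = (pvOLe lo y || L.any (fun q => decide (v q ≤ y) && c q)) := by
  induction L generalizing lo with
  | nil => simp
  | cons q t ih =>
    simp only [List.foldl_cons, List.any_cons]
    cases hc : c q with
    | false => simp [hc, ih]
    | true =>
      simp only [hc, if_true]
      rw [ih]
      cases lo with
      | none => simp [pvOLe, hc]
      | some l =>
        have h1 : decide (min l (v q) ≤ y) = (decide (l ≤ y) || decide (v q ≤ y)) := by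
          by_cases a : l ≤ y <;> by_cases b : v q ≤ y <;>
            simp [a, b, min_le_iff]
        simp [pvOLe, hc, h1, Bool.or_assoc, Bool.or_left_comm, Bool.or_comm]

-- running-max fold, dually
theorem pvFoldMax_ge (L : List ((Int × Int) × (Int × Int)))
    (c : ((Int × Int) × (Int × Int)) → Bool) (v : ((Int × Int) × (Int × Int)) → Int) (y : Int)
    (hi : Option Int) :
    pvOGe (L.foldl (fun a q => if c q then (match a with | none => some (v q) | some h => some (max h (v q))) else a) hi) y
      = (pvOGe hi y || L.any (fun q => decide (y ≤ v q) && c q)) := by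
  induction L generalizing hi with
  | nil => simp
  | cons q t ih =>
    simp only [List.foldl_cons, List.any_cons]
    cases hc : c q with
    | false => simp [hc, ih]
    | true =>
      simp only [hc, if_true]
      rw [ih]
      cases hi with
      | none => simp [pvOGe, hc]
      | some h =>
        have h1 : decide (y ≤ max h (v q)) = (decide (y ≤ h) || decide (y ≤ v q)) := by
          by_cases a : y ≤ h <;> by_cases b : y ≤ v q <;>
            simp [a, b, le_max_iff]
        simp [pvOGe, hc, h1, Bool.or_assoc, Bool.or_left_comm, Bool.or_comm]

-- the fold result is none iff it started none and no element was selected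
theorem pvFoldUpd_none (L : List ((Int × Int) × (Int × Int)))
    (c : ((Int × Int) × (Int × Int)) → Bool) (u : Option Int → ((Int × Int) × (Int × Int)) → Option Int)
    (hu : ∀ a q, u a q ≠ none) (o : Option Int) :
    (L.foldl (fun a q => if c q then u a q else a) o = none)
      ↔ (o = none ∧ L.all (fun q => !c q)) := by
  induction L generalizing o with
  | nil => simp
  | cons q t ih =>
    simp only [List.foldl_cons, List.all_cons]
    cases hc : c q with
    | false => simp [hc, ih]
    | true =>
      simp only [hc, if_true]
      rw [ih]
      simp [hu o q]

-- per corner: B's extrema test equals the four existence booleans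
theorem pvOkCorner_eq (px py : Int) (H V : List ((Int × Int) × (Int × Int))) :
    pvOkCorner px py (pvHExt px H) (pvVExt py V)
    = ((H.any (fun q => decide (q.1.2 ≤ py) && decide (min q.1.1 q.2.1 ≤ px ∧ px ≤ max q.1.1 q.2.1))
       && H.any (fun q => decide (py ≤ q.1.2) && decide (min q.1.1 q.2.1 ≤ px ∧ px ≤ max q.1.1 q.2.1)))
      && (V.any (fun q => decide (q.1.1 ≤ px) && decide (min q.1.2 q.2.2 ≤ py ∧ py ≤ max q.1.2 q.2.2))
       && V.any (fun q => decide (px ≤ q.1.1) && decide (min q.1.2 q.2.2 ≤ py ∧ py ≤ max q.1.2 q.2.2)))) := by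
  unfold pvOkCorner pvHExt pvVExt
  rw [pvFold_split H (fun q => decide (min q.1.1 q.2.1 ≤ px ∧ px ≤ max q.1.1 q.2.1))
        (fun a q => (match a with | none => some q.1.2 | some l => some (min l q.1.2)))
        (fun a q => (match a with | none => some q.1.2 | some h => some (max h q.1.2))) none none,
      pvFold_split V (fun q => decide (min q.1.2 q.2.2 ≤ py ∧ py ≤ max q.1.2 q.2.2))
        (fun a q => (match a with | none => some q.1.1 | some l => some (min l q.1.1)))
        (fun a q => (match a with | none => some q.1.1 | some h => some (max h q.1.1))) none none]
  rw [pvMatch_eq _ _ _ (by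
        rw [pvFoldUpd_none _ _ _ (fun a q => by cases a <;> simp),
            pvFoldUpd_none _ _ _ (fun a q => by cases a <;> simp)]),
      pvMatch_eq _ _ _ (by
        rw [pvFoldUpd_none _ _ _ (fun a q => by cases a <;> simp),
            pvFoldUpd_none _ _ _ (fun a q => by cases a <;> simp)])]
  rw [pvFoldMin_le, pvFoldMax_ge, pvFoldMin_le, pvFoldMax_ge]
  simp [pvOLe, pvOGe]

-- per corner: A's flag computation equals B's per-corner test
theorem pvACorner_eq (px py : Int) (H V : List ((Int × Int) × (Int × Int))) :
    ((pvHScan px py false false H).1 &&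
     (if (pvHScan px py false false H).1 && (pvHScan px py false false H).2
      then pvVScan px py false false V else (false, false)).1 &&
     (pvHScan px py false false H).2 &&
     (if (pvHScan px py false false H).1 && (pvHScan px py false false H).2
      then pvVScan px py false false V else (false, false)).2)
    = pvOkCorner px py (pvHExt px H) (pvVExt py V) := by
  rw [pvHScan_eq, pvVScan_eq, pvOkCorner_eq]
  simp only [Bool.false_or, ge_iff_le]
  cases H.any (fun q => decide (q.1.2 ≤ py) && decide (min q.1.1 q.2.1 ≤ px ∧ px ≤ max q.1.1 q.2.1)) <;>
  cases H.any (fun q => decide (py ≤ q.1.2) && decide (min q.1.1 q.2.1 ≤ px ∧ px ≤ max q.1.1 q.2.1)) <;>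
  cases V.any (fun q => decide (q.1.1 ≤ px) && decide (min q.1.2 q.2.2 ≤ py ∧ py ≤ max q.1.2 q.2.2)) <;>
  cases V.any (fun q => decide (px ≤ q.1.1) && decide (min q.1.2 q.2.2 ≤ py ∧ py ≤ max q.1.2 q.2.2)) <;>
    simp

-- ===== VERDICT (by name: the statement is the Claim_ definition above) =====
theorem are_corners_in_four_walls_spec : Claim_equal_are_corners_in_four_walls := by
  intro minx miny maxx maxy H V _
  unfold Spec_are_corners_in_four_walls are_corners_in_four_walls are_corners_in_four_walls_alt
  simp only [List.foldl_cons, List.foldl_nil, List.all_cons, List.all_nil]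
  rw [pvACorner_eq, pvACorner_eq, pvACorner_eq, pvACorner_eq]
  cases pvOkCorner minx miny (pvHExt minx H) (pvVExt miny V) <;>
  cases pvOkCorner minx maxy (pvHExt minx H) (pvVExt maxy V) <;>
  cases pvOkCorner maxx miny (pvHExt maxx H) (pvVExt miny V) <;>
  cases pvOkCorner maxx maxy (pvHExt maxx H) (pvVExt maxy V) <;>
    simp
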